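-- pv_equiv track=rewrite | github.com/ivanwakeup/algorithms | algorithms/prep/microsoft/min_moves_string_without_3_consec_chars.py | get_min_moves
-- ===== SOURCE A (Python) =====
-- def get_min_moves(s):
--     result = 0
--     run_length = 1
--     for i in range(1, len(s)):
--         if s[i] == s[i-1]:
--             run_length+=1
--         else:
--             result += run_length // 3
--             run_length=1
--     result+=run_length//3
--     return result
-- ===== SOURCE B (Python) =====
-- def get_min_moves(s):
--     # Simulate the repair: build the kept/repaired sequence on a stack;
--     # whenever a char would be the third consecutive equal one, count a move
--     # and push a neutral marker (the replaced character) instead.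
--     kept = []
--     res = 0
--     for c in s:
--         if len(kept) >= 2 and kept[-1] == c and kept[-2] == c:
--             res += 1
--             kept.append(None)
--         else:
--             kept.append(c)
--     return res
-- ===== Notes on version B (the rewrite author's own statement) =====
-- stated objective: alternative
-- what changed: Instead of counting run lengths and adding run_length//3, B simulates the repair itself: it builds the repaired sequence on a stack, and whenever an incoming character equals the top two kept elements it records one move and pushes a neutral marker in its place; no run lengths, counters or integer division.
import Mathlib
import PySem

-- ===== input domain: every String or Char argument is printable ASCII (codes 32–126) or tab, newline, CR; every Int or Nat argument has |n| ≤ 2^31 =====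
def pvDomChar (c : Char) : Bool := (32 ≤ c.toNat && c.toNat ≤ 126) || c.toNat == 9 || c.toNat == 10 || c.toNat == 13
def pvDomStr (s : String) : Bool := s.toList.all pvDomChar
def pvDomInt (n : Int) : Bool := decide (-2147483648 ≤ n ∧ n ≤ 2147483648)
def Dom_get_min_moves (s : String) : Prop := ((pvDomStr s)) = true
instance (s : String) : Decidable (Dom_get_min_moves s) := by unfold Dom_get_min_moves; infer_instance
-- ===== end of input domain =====

-- B simulates the repair on a stack of kept characters (pushing a marker for each
-- replaced char) instead of A's run_length//3 accumulation; alternative algorithm, same cost.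

-- ===== PORT A =====
-- The loop 'for i in range(1, len(s))' compares s[i] with s[i-1]; ported as
-- structural recursion over s.toList carrying the previous character and the
-- same state (result, run_length).
def pvGoA (prev : Char) (run_length result : Int) : List Char → Int
  | [] => result + PySem.Int.floordiv run_length 3
  | c :: rest =>
    if c == prev then pvGoA c (run_length + 1) result rest
    else pvGoA c 1 (result + PySem.Int.floordiv run_length 3) rest

def get_min_moves (s : String) : Int :=
  match s.toList with
  | [] => 0 + PySem.Int.floordiv 1 3
  | c :: rest => pvGoA c 1 0 rest

-- ===== PORT B =====
-- Source B appends to the 'kept' list and reads kept[-1], kept[-2]; ported with the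
-- list stored most-recent-first, so kept[-1]/kept[-2] are the first two elements
-- and append is cons — exact, same elements in reverse order.
def pvGoB : List Char → List (Option Char) → Int → Int
  | [], _, res => res
  | c :: rest, kept, res =>
    match kept with
    | k1 :: k2 :: _ =>
      if k1 == some c && k2 == some c then pvGoB rest (none :: kept) (res + 1)
      else pvGoB rest (some c :: kept) res
    | _ => pvGoB rest (some c :: kept) res

def get_min_moves_alt (s : String) : Int :=
  pvGoB s.toList [] 0

-- ===== PRECONDITION & SPEC =====
def Spec_get_min_moves (s : String) (out : Int) : Prop := out = get_min_moves_alt s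
instance (s : String) (out : Int) : Decidable (Spec_get_min_moves s out) := by unfold Spec_get_min_moves; infer_instance

-- ===== CLAIM (what is proved, stated in full; the proofs are below) =====
def Claim_equal_get_min_moves : Prop := ∀ (s : String), Dom_get_min_moves s → Spec_get_min_moves s (get_min_moves s)

-- ===== LEMMAS AND PROOFS =====

theorem pv_fd3 (q cnt : Int) (h0 : 0 ≤ cnt) (h3 : cnt < 3) (hq : 0 ≤ q) :
    PySem.Int.floordiv (3 * q + cnt) 3 = q := by
  rw [PySem.Int.floordiv_eq_ediv_of_pos (by norm_num)]
  omega

-- B's stack represents A's run-length state: cnt = run_length mod 3.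
def pvRep (prev : Char) (cnt : Int) (kept : List (Option Char)) : Prop :=
  (cnt = 0 ∧ ∃ t, kept = none :: t) ∨
  (cnt = 1 ∧ ∃ t, kept = some prev :: t ∧ t.head? ≠ some (some prev)) ∨
  (cnt = 2 ∧ ∃ t, kept = some prev :: some prev :: t)

theorem pvGoB_push (c : Char) (rest : List Char) (kept : List (Option Char)) (res : Int)
    (h : kept.head? ≠ some (some c) ∨ kept.tail.head? ≠ some (some c)) :
    pvGoB (c :: rest) kept res = pvGoB rest (some c :: kept) res := by
  match kept with
  | [] => rfl
  | [k] => rfl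
  | k1 :: k2 :: t =>
    have : (k1 == some c && k2 == some c) = false := by
      simp only [List.head?, List.tail] at h
      rcases h with h | h <;> simp [beq_iff_eq] <;> intro e <;> simp [e] at h <;> omega
    simp [pvGoB, this]

theorem pv_key : ∀ (rest : List Char) (prev : Char) (cnt q res : Int)
    (kept : List (Option Char)), pvRep prev cnt kept → 0 ≤ q →
    pvGoA prev (3 * q + cnt) res rest = pvGoB rest kept (res + q) := by
  intro rest
  induction rest with
  | nil =>
      intro prev cnt q res kept hrep hq
      have hc : cnt = 0 ∨ cnt = 1 ∨ cnt = 2 := by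
        rcases hrep with ⟨h,_⟩|⟨h,_⟩|⟨h,_⟩ <;> simp [h]
      simp only [pvGoA, pvGoB]
      rw [pv_fd3 q cnt (by omega) (by omega) hq]
  | cons c rest ih =>
      intro prev cnt q res kept hrep hq
      by_cases hc : c = prev
      · subst hc
        simp only [pvGoA, beq_self_eq_true, if_pos]
        rcases hrep with ⟨h0, t, hk⟩ | ⟨h1, t, hk, ht⟩ | ⟨h2, t, hk⟩
        · subst h0 hk
          rw [pvGoB_push _ _ _ _ (Or.inl (by simp))]
          have e : (3:Int) * q + 0 + 1 = 3 * q + 1 := by ring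
          rw [e, ih c 1 q res _ (Or.inr (Or.inl ⟨rfl, none :: t, rfl, by simp⟩)) hq]
        · subst h1 hk
          rw [pvGoB_push _ _ _ _ (Or.inr (by simpa using ht))]
          have e : (3:Int) * q + 1 + 1 = 3 * q + 2 := by ring
          rw [e, ih c 2 q res _ (Or.inr (Or.inr ⟨rfl, t, rfl⟩)) hq]
        · subst h2 hk
          have hf : pvGoB (c :: rest) (some c :: some c :: t) (res + q)
              = pvGoB rest (none :: some c :: some c :: t) (res + q + 1) := by
            simp [pvGoB]
          rw [hf]
          have e : (3:Int) * q + 2 + 1 = 3 * (q + 1) + 0 := by ring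
          rw [e, ih c 0 (q + 1) res _ (Or.inl ⟨rfl, some c :: some c :: t, rfl⟩) (by omega)]
          ring_nf
      · have hb : (c == prev) = false := by simp [hc]
        simp only [pvGoA, hb, Bool.false_eq_true, if_false]
        have hcnt : cnt = 0 ∨ cnt = 1 ∨ cnt = 2 := by
          rcases hrep with ⟨h,_⟩|⟨h,_⟩|⟨h,_⟩ <;> simp [h]
        rw [pv_fd3 q cnt (by omega) (by omega) hq]
        have hpush : pvGoB (c :: rest) kept (res + q)
            = pvGoB rest (some c :: kept) (res + q) := by
          rcases hrep with ⟨_, t, hk⟩ | ⟨_, t, hk, _⟩ | ⟨_, t, hk⟩ <;> subst hk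
          · exact pvGoB_push _ _ _ _ (Or.inl (by simp))
          · exact pvGoB_push _ _ _ _ (Or.inl (by simp [Ne.symm hc]))
          · exact pvGoB_push _ _ _ _ (Or.inl (by simp [Ne.symm hc]))
        rw [hpush]
        have hrep' : pvRep c 1 (some c :: kept) := by
          refine Or.inr (Or.inl ⟨rfl, kept, rfl, ?_⟩)
          rcases hrep with ⟨_, t, hk⟩ | ⟨_, t, hk, _⟩ | ⟨_, t, hk⟩ <;> subst hk <;>
            simp [Ne.symm hc]
        have e : (1 : Int) = 3 * 0 + 1 := by ring
        rw [e, ih c 1 0 (res + q) _ hrep' (by omega)]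
        ring_nf

-- ===== VERDICT (by name: the statement is the Claim_ definition above) =====
theorem get_min_moves_spec : Claim_equal_get_min_moves := by
  intro s _
  unfold Spec_get_min_moves get_min_moves get_min_moves_alt
  cases h : s.toList with
  | nil => simp [pvGoB, PySem.Int.floordiv]
  | cons c rest =>
      rw [pvGoB_push _ _ _ _ (Or.inl (by simp))]
      show pvGoA c 1 0 rest = pvGoB rest [some c] 0
      have e : (1 : Int) = 3 * 0 + 1 := by ring
      rw [e, pv_key rest c 1 0 0 _ (Or.inr (Or.inl ⟨rfl, [], rfl, by simp⟩)) (by omega)]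
      norm_num
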